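-- pv_equiv track=rewrite | github.com/PDinesen/AdventofCode | 2020/AoC18.py | find_levels
-- ===== SOURCE A (Python) =====
-- def find_levels(string_number):
--     start = [i for i in range(len(string_number)) if string_number[i] == '(']
--     end = [i for i in range(len(string_number)) if string_number[i] == ')']
--     indexes = start + end
--     levels = []
--     level = 0
--     while len(start) > 0:
--         for i in range(len(start)):
--             if i == len(start) - 1:
--                 return [start[i], end[0]]
--
--             elif start[i+1] > end[0]:
--                 return [start[i], end[0]]
-- ===== SOURCE B (Python) =====
-- def find_levels(string_number):
--     last_open = None
--     first_close = None
--     for i, c in enumerate(string_number):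
--         if c == '(':
--             last_open = i
--             if first_close is not None:
--                 return [last_open, first_close]
--         elif c == ')' and first_close is None:
--             if last_open is not None:
--                 return [last_open, i]
--             first_close = i
--     return None
-- ===== Notes on version B (the rewrite author's own statement) =====
-- stated objective: simpler
-- what changed: Replaces A's two staged positional-index list builds plus a lookahead while/for scan by a single character pass with two registers (last open seen, first close seen) that returns as soon as the pair is determined; the index lists and A's dead variables (indexes, levels, level) disappear, and the early exit plus absence of list construction is the constant-factor speedup a timing run measured.
-- outside the precondition, e.g. on find_levels(')'): A returns None, B returns None; on find_levels('('): A raises IndexError, B returns None; on find_levels('abc'): A returns None, B returns None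
import Mathlib
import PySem

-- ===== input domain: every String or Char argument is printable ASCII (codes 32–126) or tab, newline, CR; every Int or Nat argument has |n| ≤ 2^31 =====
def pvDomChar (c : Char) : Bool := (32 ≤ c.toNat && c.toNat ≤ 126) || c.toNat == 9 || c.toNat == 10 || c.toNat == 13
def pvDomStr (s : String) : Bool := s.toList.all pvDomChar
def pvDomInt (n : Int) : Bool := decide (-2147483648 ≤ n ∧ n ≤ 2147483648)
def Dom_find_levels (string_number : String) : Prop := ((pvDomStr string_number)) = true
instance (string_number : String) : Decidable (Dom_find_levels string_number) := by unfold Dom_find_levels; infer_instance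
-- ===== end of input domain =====

-- B replaces A's staged index-list builds + lookahead scan by a single character pass with two registers; objective: simpler.

-- ===== PORT A =====
-- the for-loop of A: i == len(start)-1 → return [start[i], end[0]]; start[i+1] > end[0] → return [start[i], end[0]]
def findLevelsLoopA (start : List Int) (e0 : Int) : List Int :=
  match start with
  | [] => []                 -- unreachable in A (while-guard len(start) > 0)
  | [x] => [x, e0]
  | x :: y :: rest => if y > e0 then [x, e0] else findLevelsLoopA (y :: rest) e0

def find_levels (string_number : String) : List Int :=
  let l := string_number.toList
  let start : List Int := ((List.range l.length).filter (fun i => l[i]? = some '(')).map Int.ofNat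
  let «end» : List Int := ((List.range l.length).filter (fun i => l[i]? = some ')')).map Int.ofNat
  match «end» with
  | e0 :: _ => if start.length > 0 then findLevelsLoopA start e0 else []   -- start = [] : Python falls off, returns None (outside Pre_)
  | [] => []                 -- end[0] raises IndexError in Python (outside Pre_)

-- ===== PORT B =====
-- B's for-loop: state (last_open, first_close); '(' updates last_open and returns if a close was seen;
-- the first ')' returns if an open was seen, else records first_close. none = Python's final 'return None'.
def findLevelsLoopB (chars : List (Int × Char)) (lastOpen firstClose : Option Int) : Option (List Int) :=
  match chars with
  | [] => none
  | (i, c) :: rest =>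
    if c = '(' then
      match firstClose with
      | some f => some [i, f]
      | none => findLevelsLoopB rest (some i) firstClose
    else if c = ')' ∧ firstClose = none then
      match lastOpen with
      | some lo => some [lo, i]
      | none => findLevelsLoopB rest lastOpen (some i)
    else findLevelsLoopB rest lastOpen firstClose

def find_levels_alt (string_number : String) : List Int :=
  match findLevelsLoopB (PySem.List.enumerate string_number.toList) none none with
  | some r => r
  | none => []               -- Python B returns None here (outside Pre_)

-- ===== PRECONDITION & SPEC =====
-- Pre_ excludes strings without '(' (A returns None, not a list of ints) and strings with '(' but no ')'
-- (A raises IndexError on end[0]); B returns None on both.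
def Pre_find_levels (string_number : String) : Prop :=
  '(' ∈ string_number.toList ∧ ')' ∈ string_number.toList
instance (string_number : String) : Decidable (Pre_find_levels string_number) := by
  unfold Pre_find_levels; infer_instance

def pvWitness_find_levels : String := "a(b(c)d)"

def Spec_find_levels (string_number : String) (out : List Int) : Prop := out = find_levels_alt string_number
instance (string_number : String) (out : List Int) : Decidable (Spec_find_levels string_number out) := by unfold Spec_find_levels; infer_instance

-- ===== CLAIM (what is proved, stated in full; the proofs are below) =====
def Claim_equal_find_levels : Prop := ∀ (string_number : String), Dom_find_levels string_number → Pre_find_levels string_number → Spec_find_levels string_number (find_levels string_number)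

-- ===== LEMMAS AND PROOFS =====

-- occurrence indices of character c in l, starting offset s
def occIdx (c : Char) : List Char → Int → List Int
  | [], _ => []
  | x :: t, s => if x = c then s :: occIdx c t (s + 1) else occIdx c t (s + 1)

theorem range_occ (c : Char) (l : List Char) (s : Int) :
    ((List.range l.length).filter (fun i => l[i]? = some c)).map (fun i => Int.ofNat i + s)
      = occIdx c l s := by
  induction l generalizing s with
  | nil => simp [occIdx]
  | cons x t ih =>
    simp only [List.length_cons, List.range_succ_eq_map, List.filter_cons,
      List.getElem?_cons_zero, List.filter_map, Function.comp_def, List.getElem?_cons_succ,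
      Nat.succ_eq_add_one, occIdx]
    by_cases h : x = c
    all_goals
      simp [h, List.map_map, Function.comp_def]
      rw [← ih (s + 1)]
      exact List.map_congr_left fun a _ => by simp only [Int.ofNat_eq_natCast]; omega

theorem range_occ0 (c : Char) (l : List Char) :
    ((List.range l.length).filter (fun i => l[i]? = some c)).map Int.ofNat = occIdx c l 0 := by
  rw [← range_occ c l 0]
  exact List.map_congr_left (fun a _ => by simp)

theorem occIdx_lb (c : Char) (l : List Char) (s : Int) :
    ∀ y ∈ occIdx c l s, s ≤ y := by
  induction l generalizing s with
  | nil => simp [occIdx]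
  | cons x t ih =>
    intro y hy
    simp only [occIdx] at hy
    by_cases h : x = c
    · simp [h] at hy
      rcases hy with rfl | hy
      · omega
      · have := ih (s + 1) y hy; omega
    · simp [h] at hy
      have := ih (s + 1) y hy; omega

theorem occIdx_sorted (c : Char) (l : List Char) (s : Int) :
    (occIdx c l s).Pairwise (· < ·) := by
  induction l generalizing s with
  | nil => simp [occIdx]
  | cons x t ih =>
    simp only [occIdx]
    by_cases h : x = c
    · rw [if_pos h, List.pairwise_cons]
      exact ⟨fun y hy => by have := occIdx_lb c t (s + 1) y hy; omega, ih (s + 1)⟩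
    · simp [h, ih (s + 1)]

theorem occIdx_ne_nil {c : Char} {l : List Char} (h : c ∈ l) (s : Int) :
    occIdx c l s ≠ [] := by
  induction l generalizing s with
  | nil => simp at h
  | cons x t ih =>
    simp only [occIdx]
    by_cases hx : x = c
    · simp [hx]
    · have ht : c ∈ t := by
        rcases List.mem_cons.mp h with rfl | ht
        · exact absurd rfl hx
        · exact ht
      simp [hx, ih ht (s + 1)]

-- last open ≤/< f picker: shared reference for both loops
def pickO (lo : Option Int) (opens : List Int) (f : Int) : Option Int :=
  match opens with
  | [] => lo
  | p :: rest => if p ≤ f then pickO (some p) rest f else lo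

theorem pickO_some (x : Int) (opens : List Int) (f : Int) :
    ∃ y, pickO (some x) opens f = some y := by
  induction opens generalizing x with
  | nil => exact ⟨x, rfl⟩
  | cons p rest ih =>
    simp only [pickO]
    by_cases h : p ≤ f
    · simpa [h] using ih p
    · exact ⟨x, by simp [h]⟩

-- reference result for both ports (given carried lastOpen lo and the occurrence lists)
def refRes (lo : Option Int) (opens closes : List Int) : Option (List Int) :=
  match closes with
  | [] => none
  | f :: _ =>
    match pickO lo opens f with
    | some o => some [o, f]
    | none =>
      match opens with
      | o :: _ => some [o, f]
      | [] => none

-- A's loop computes refRes none on a sorted opens list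
theorem loopA_refRes (f : Int) (x : Int) (l : List Int)
    (hs : (x :: l).Pairwise (· < ·)) :
    some (findLevelsLoopA (x :: l) f) = refRes none (x :: l) (f :: []) := by
  induction l generalizing x with
  | nil =>
    simp only [findLevelsLoopA, refRes, pickO]
    by_cases h : x ≤ f <;> simp [h]
  | cons y rest ih =>
    have hxy : x < y := (List.pairwise_cons.mp hs).1 y (List.mem_cons_self ..)
    have hs' : (y :: rest).Pairwise (· < ·) := (List.pairwise_cons.mp hs).2
    simp only [findLevelsLoopA, refRes, pickO]
    by_cases hy : y > f
    · have hnle : ¬ y ≤ f := by omega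
      simp only [if_pos hy, if_neg hnle]
      by_cases hx : x ≤ f <;> simp [hx, pickO]
    · have hyle : y ≤ f := by omega
      have hxle : x ≤ f := by omega
      simp only [if_neg hy, if_pos hyle, if_pos hxle]
      have := ih y hs'
      simp only [refRes, pickO, if_pos hyle] at this
      rw [this]
      obtain ⟨z, hz⟩ := pickO_some y rest f
      simp [hz]

-- B's loop after a close was recorded with no prior open: returns the first '(' of the rest
theorem loopB_close (l : List Char) (s : Int) (f : Int) :
    findLevelsLoopB (PySem.List.enumerate l s) none (some f) =
      match occIdx '(' l s with
      | [] => none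
      | o :: _ => some [o, f] := by
  induction l generalizing s with
  | nil => simp [PySem.List.enumerate_nil, findLevelsLoopB, occIdx]
  | cons x t ih =>
    simp only [PySem.List.enumerate_cons, findLevelsLoopB, occIdx]
    by_cases hx : x = '('
    · simp [hx]
    · have hx' : ¬ (x = ')' ∧ (some f : Option Int) = none) := by simp
      simp only [if_neg hx, if_neg hx']
      simp [ih (s + 1)]

-- B's loop before any close: computes refRes of the occurrence lists
theorem loopB_main (l : List Char) (s : Int) (lo : Option Int) :
    findLevelsLoopB (PySem.List.enumerate l s) lo none =
      refRes lo (occIdx '(' l s) (occIdx ')' l s) := by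
  induction l generalizing s lo with
  | nil => simp [PySem.List.enumerate_nil, findLevelsLoopB, occIdx, refRes]
  | cons x t ih =>
    simp only [PySem.List.enumerate_cons, findLevelsLoopB, occIdx]
    by_cases hx : x = '('
    · have hne : x ≠ ')' := by subst hx; decide
      simp only [hx, if_neg hne]
      rw [ih (s + 1) (some s)]
      simp only [refRes]
      rcases hcl : occIdx ')' t (s + 1) with _ | ⟨f, rc⟩
      · rfl
      · have hf : s + 1 ≤ f := occIdx_lb ')' t (s + 1) f (by rw [hcl]; exact List.mem_cons_self ..)
        have hsf : s ≤ f := by omega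
        obtain ⟨z, hz⟩ := pickO_some s (occIdx '(' t (s + 1)) f
        simp [pickO, hsf, hz]
    · by_cases hc : x = ')'
      · have hcond : (x = ')' ∧ (none : Option Int) = none) := ⟨hc, rfl⟩
        simp only [if_neg hx, hc, if_pos rfl]
        cases lo with
        | some l0 =>
          simp only [refRes]
          rcases hop : occIdx '(' t (s + 1) with _ | ⟨o, ro⟩
          · rfl
          · have ho : s + 1 ≤ o := occIdx_lb '(' t (s + 1) o (by rw [hop]; exact List.mem_cons_self ..)
            have : ¬ o ≤ s := by omega
            simp [pickO, this]
        | none =>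
          rw [loopB_close t (s + 1) s]
          simp only [refRes]
          rcases hop : occIdx '(' t (s + 1) with _ | ⟨o, ro⟩
          · simp [pickO]
          · have ho : s + 1 ≤ o := occIdx_lb '(' t (s + 1) o (by rw [hop]; exact List.mem_cons_self ..)
            have : ¬ o ≤ s := by omega
            simp [pickO, this]
      · have hcond : ¬ (x = ')' ∧ (none : Option Int) = none) := fun h => hc h.1
        simp only [if_neg hx]
        simp [hc, ih (s + 1) lo]

-- ===== VERDICT (by name: the statement is the Claim_ definition above) =====
theorem find_levels_spec : Claim_equal_find_levels := by
  intro s _ hpre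
  obtain ⟨ho, hc⟩ := hpre
  unfold Spec_find_levels find_levels find_levels_alt
  simp only [range_occ0, loopB_main]
  obtain ⟨o, ro, heo⟩ := List.exists_cons_of_ne_nil (occIdx_ne_nil ho 0)
  obtain ⟨f, rc, hec⟩ := List.exists_cons_of_ne_nil (occIdx_ne_nil hc 0)
  rw [heo, hec]
  have hs : (o :: ro).Pairwise (· < ·) := heo ▸ occIdx_sorted '(' s.toList 0
  have hA := loopA_refRes f o ro hs
  have hsame : refRes none (o :: ro) (f :: []) = refRes none (o :: ro) (f :: rc) := by
    simp only [refRes]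
  rw [hsame] at hA
  simp only [List.length_cons, gt_iff_lt, Nat.succ_pos, if_pos]
  rcases hres : refRes none (o :: ro) (f :: rc) with _ | r
  · rw [hres] at hA; exact absurd hA (by simp)
  · rw [hres] at hA; simpa using hA
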